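-- pv_equiv track=rewrite | github.com/chiyc/advent-of-code-2023 | 03.py | row_numbers
-- ===== SOURCE A (Python) =====
-- from collections import namedtuple
--
-- Loc = namedtuple('Loc', ['i',  'j0', 'j1']) # exclusive j1
--
-- def row_numbers(schematic, i):
--     row = schematic[i]
--     j0, j1 = 0, 0
--     while j0 < len(row) and j1 < len(row):
--         if row[j0].isdigit():
--             j1 = j0 + 1
--             while j1 < len(row) and row[j1].isdigit():
--                 j1 += 1
--             yield Loc(i, j0, j1)
--             j0 = j1
--         else:
--             j0 += 1
-- ===== SOURCE B (Python) =====
-- from collections import namedtuple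
--
-- Loc = namedtuple('Loc', ['i', 'j0', 'j1'])  # exclusive j1
--
-- def row_numbers(schematic, i):
--     row = schematic[i]
--     out = []
--     start = None
--     for j, c in enumerate(row):
--         if c.isdigit():
--             if start is None:
--                 start = j
--         elif start is not None:
--             out.append(Loc(i, start, j))
--             start = None
--     if start is not None:
--         out.append(Loc(i, start, len(row)))
--     return out
-- ===== Notes on version B (the rewrite author's own statement) =====
-- stated objective: simpler
-- what changed: Replaced A's nested while loops with dual cursors j0/j1 by a single flat enumerate pass keeping an Option start marker and flushing the open run after the loop.
import Mathlib
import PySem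

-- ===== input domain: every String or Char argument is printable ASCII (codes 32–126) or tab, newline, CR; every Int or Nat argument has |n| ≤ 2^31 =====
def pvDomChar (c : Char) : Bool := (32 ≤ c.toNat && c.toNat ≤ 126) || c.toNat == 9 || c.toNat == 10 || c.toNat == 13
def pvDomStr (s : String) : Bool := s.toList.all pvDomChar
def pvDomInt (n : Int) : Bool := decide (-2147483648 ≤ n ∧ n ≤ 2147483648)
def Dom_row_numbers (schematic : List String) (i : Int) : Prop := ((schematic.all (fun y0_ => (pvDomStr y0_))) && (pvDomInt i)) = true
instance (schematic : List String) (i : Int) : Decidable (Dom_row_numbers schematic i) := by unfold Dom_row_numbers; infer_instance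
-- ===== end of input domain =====

-- B replaces A's nested while loops (two cursors j0/j1) by a single flat pass with an
-- Option start marker; objective: simpler. Return-value equivalence on Pre_ (i a valid index).

-- ===== PORT A =====
-- inner while: 'while j1 < len(row) and row[j1].isdigit(): j1 += 1'
-- (row[j1] is ported as getD, exact since the condition guarantees j1 < len)
def innerA (cs : List Char) (j1 : Nat) : Nat :=
  if h : j1 < cs.length ∧ PySem.Chars.isdigit (cs.getD j1 ' ') then innerA cs (j1 + 1) else j1
termination_by cs.length - j1
decreasing_by omega

theorem le_innerA (cs : List Char) (j1 : Nat) : j1 ≤ innerA cs j1 := by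
  rw [innerA]
  split
  · have := le_innerA cs (j1 + 1); omega
  · exact le_refl _
termination_by cs.length - j1
decreasing_by omega

-- outer while with the yields collected in order
def loopA (cs : List Char) (i : Int) (j0 j1 : Nat) : List (Int × Int × Int) :=
  if h : j0 < cs.length ∧ j1 < cs.length then
    if PySem.Chars.isdigit (cs.getD j0 ' ') then
      (i, (j0 : Int), (innerA cs (j0 + 1) : Int)) ::
        loopA cs i (innerA cs (j0 + 1)) (innerA cs (j0 + 1))
    else loopA cs i (j0 + 1) j1
  else []
termination_by cs.length - j0
decreasing_by
  · have := le_innerA cs (j0 + 1); omega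
  · omega

def row_numbers (schematic : List String) (i : Int) : List (Int × Int × Int) :=
  match PySem.List.pyGet? schematic i with
  | none => []          -- IndexError: excluded by Pre_row_numbers
  | some row => loopA row.toList i 0 0

-- ===== PORT B =====
-- the 'for j, c in enumerate(row)' loop; returns (out, start) as left at loop exit
def loopB (i : Int) : List Char → Nat → Option Nat → List (Int × Int × Int) →
    List (Int × Int × Int) × Option Nat
  | [], _, start, out => (out, start)
  | c :: rest, j, start, out =>
    if PySem.Chars.isdigit c then
      loopB i rest (j + 1) (match start with | none => some j | some s => some s) out
    else
      match start with
      | none => loopB i rest (j + 1) none out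
      | some s => loopB i rest (j + 1) none (out ++ [(i, (s : Int), (j : Int))])

-- the post-loop 'if start is not None: out.append(Loc(i, start, len(row)))'
def flushB (i : Int) (n : Nat) (p : List (Int × Int × Int) × Option Nat) : List (Int × Int × Int) :=
  match p.2 with
  | some s => p.1 ++ [(i, (s : Int), (n : Int))]
  | none => p.1

def row_numbers_alt (schematic : List String) (i : Int) : List (Int × Int × Int) :=
  match PySem.List.pyGet? schematic i with
  | none => []          -- IndexError: excluded by Pre_row_numbers
  | some row => flushB i row.toList.length (loopB i row.toList 0 none [])

-- ===== PRECONDITION & SPEC =====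
-- Pre_ excludes exactly the inputs where Python's schematic[i] raises IndexError.
def Pre_row_numbers (schematic : List String) (i : Int) : Prop :=
  PySem.Raise.InRange schematic.length i
instance (schematic : List String) (i : Int) : Decidable (Pre_row_numbers schematic i) := by
  unfold Pre_row_numbers; infer_instance

def pvWitness_row_numbers : List String × Int := (["12..3a45"], 0)

def Spec_row_numbers (schematic : List String) (i : Int) (out : List (Int × Int × Int)) : Prop := out = row_numbers_alt schematic i
instance (schematic : List String) (i : Int) (out : List (Int × Int × Int)) : Decidable (Spec_row_numbers schematic i out) := by unfold Spec_row_numbers; infer_instance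

-- ===== CLAIM (what is proved, stated in full; the proofs are below) =====
def Claim_equal_row_numbers : Prop := ∀ (schematic : List String) (i : Int), Dom_row_numbers schematic i → Pre_row_numbers schematic i → Spec_row_numbers schematic i (row_numbers schematic i)

-- ===== LEMMAS AND PROOFS =====

theorem pvWitness_ok :
    Dom_row_numbers pvWitness_row_numbers.1 pvWitness_row_numbers.2 ∧
    Pre_row_numbers pvWitness_row_numbers.1 pvWitness_row_numbers.2 := by
  constructor <;> decide

theorem drop_facts {cs rest : List Char} {c : Char} {j : Nat}
    (h : cs.drop j = c :: rest) :
    j < cs.length ∧ cs.drop (j + 1) = rest ∧ cs.getD j ' ' = c := by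
  have hlen := congrArg List.length h
  simp at hlen
  have hj : j < cs.length := by omega
  refine ⟨hj, ?_, ?_⟩
  · have h2 : cs.drop (j + 1) = (cs.drop j).drop 1 := by rw [List.drop_drop]
    rw [h2, h]; rfl
  · have hget : cs[j]? = some c := by
      have h3 : (cs.drop j)[0]? = cs[j + 0]? := List.getElem?_drop
      rw [h] at h3; simpa using h3.symm
    simp [List.getD, hget]

-- core invariant: the flat B loop (plus its final flush) equals A's dual-cursor loop,
-- both for an idle state (start = none, with j1 ≤ j) and mid-run (start = some s)
theorem keyAB (cs : List Char) (i : Int) (rest : List Char) :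
    (∀ j j1 out, j ≤ cs.length → cs.drop j = rest → j1 ≤ j →
      flushB i cs.length (loopB i rest j none out) = out ++ loopA cs i j j1)
    ∧
    (∀ j s out, j ≤ cs.length → cs.drop j = rest →
      flushB i cs.length (loopB i rest j (some s) out)
        = out ++ (i, (s : Int), (innerA cs j : Int)) ::
            loopA cs i (innerA cs j) (innerA cs j)) := by
  induction rest with
  | nil =>
    constructor
    · intro j j1 out hj hdrop _
      have hlen := congrArg List.length hdrop
      simp at hlen
      have hj' : j = cs.length := by omega
      subst hj'
      rw [loopA, dif_neg (by omega)]
      simp [loopB, flushB]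
    · intro j s out hj hdrop
      have hlen := congrArg List.length hdrop
      simp at hlen
      have hj' : j = cs.length := by omega
      subst hj'
      have hE : innerA cs cs.length = cs.length := by
        rw [innerA, dif_neg (by omega)]
      rw [hE, loopA, dif_neg (by omega)]
      simp [loopB, flushB]
  | cons c rest' ih =>
    constructor
    · intro j j1 out hj hdrop hj1
      obtain ⟨hjlt, hdrop', hgd⟩ := drop_facts hdrop
      by_cases hd : PySem.Chars.isdigit c
      · have hstep : flushB i cs.length (loopB i (c :: rest') j none out)
            = flushB i cs.length (loopB i rest' (j + 1) (some j) out) := by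
          simp [loopB, hd]
        have hA : loopA cs i j j1 = (i, (j : Int), (innerA cs (j + 1) : Int)) ::
            loopA cs i (innerA cs (j + 1)) (innerA cs (j + 1)) := by
          rw [loopA, dif_pos ⟨hjlt, by omega⟩, hgd, if_pos hd]
        rw [hstep, ih.2 (j + 1) j out (by omega) hdrop', hA]
      · have hstep : flushB i cs.length (loopB i (c :: rest') j none out)
            = flushB i cs.length (loopB i rest' (j + 1) none out) := by
          simp [loopB, hd]
        have hA : loopA cs i j j1 = loopA cs i (j + 1) j1 := by
          rw [loopA, dif_pos ⟨hjlt, by omega⟩, hgd, if_neg hd]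
        rw [hstep, ih.1 (j + 1) j1 out (by omega) hdrop' (by omega), hA]
    · intro j s out hj hdrop
      obtain ⟨hjlt, hdrop', hgd⟩ := drop_facts hdrop
      by_cases hd : PySem.Chars.isdigit c
      · have hE : innerA cs j = innerA cs (j + 1) := by
          rw [innerA, dif_pos ⟨hjlt, by rw [hgd]; exact hd⟩]
        have hstep : flushB i cs.length (loopB i (c :: rest') j (some s) out)
            = flushB i cs.length (loopB i rest' (j + 1) (some s) out) := by
          simp [loopB, hd]
        rw [hstep, ih.2 (j + 1) s out (by omega) hdrop', hE]
      · have hE : innerA cs j = j := by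
          rw [innerA, dif_neg (by rintro ⟨-, hdig⟩; rw [hgd] at hdig; exact hd hdig)]
        have hstep : flushB i cs.length (loopB i (c :: rest') j (some s) out)
            = flushB i cs.length
                (loopB i rest' (j + 1) none (out ++ [(i, (s : Int), (j : Int))])) := by
          simp [loopB, hd]
        rw [hstep,
          ih.1 (j + 1) j (out ++ [(i, (s : Int), (j : Int))]) (by omega) hdrop' (by omega), hE]
        have hA : loopA cs i j j = loopA cs i (j + 1) j := by
          rw [loopA, dif_pos ⟨hjlt, hjlt⟩, hgd, if_neg hd]
        rw [hA]
        simp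

-- ===== VERDICT (by name: the statement is the Claim_ definition above) =====
theorem row_numbers_spec : Claim_equal_row_numbers := by
  intro schematic i _ _
  unfold Spec_row_numbers row_numbers row_numbers_alt
  cases hg : PySem.List.pyGet? schematic i with
  | none => rfl
  | some row =>
    have h := (keyAB row.toList i row.toList).1 0 0 [] (by omega) (by simp) (le_refl 0)
    simpa using h.symm
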